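-- pv_equiv track=rewrite | github.com/michabirklbauer/name_to_spectrum | streamlit_app.py | preprocess_name
-- ===== SOURCE A (Python) =====
-- import string
--
-- def get_closest_letter(letter, previous_letter):
--
--     if letter == "B":
--         return "P"
--     if letter == "J":
--         return "I"
--
--     if letter in ["O", "U"]:
--         if previous_letter not in ["O", "U"]:
--             return "EW"
--         else:
--             return ""
--
--     if letter == "X":
--         return "KS"
--     if letter == "Y":
--         return "I"
--
--     return ""
--
-- def preprocess_name(name, impute = False):
--
--     preprocessed_name = ""
--     previous_letter = ""
--
--     for letter in name.upper():
--         if letter in ["B", "J", "O", "U", "X", "Z"]: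
--             if impute:
--                 preprocessed_name += get_closest_letter(letter, previous_letter)
--         else:
--             if letter in list(string.ascii_uppercase):
--                 preprocessed_name += letter
--         previous_letter = letter
--
--     return preprocessed_name
-- ===== SOURCE B (Python) =====
-- import string
--
-- def preprocess_name(name, impute = False):
--     up = name.upper()
--     if not impute:
--         allowed = set(string.ascii_uppercase) - set("BJOUXZ")
--         return "".join(c for c in up if c in allowed)
--     # phase 1: collapse each run of O/U into a single "EW" (pairwise view, no lookback state)
--     collapsed = "".join(
--         ("" if p in "OU" else "EW") if c in "OU" else c
--         for c, p in zip(up, "\x00" + up)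
--     )
--     # phase 2: table translation, dropping Z and anything that is not an uppercase letter
--     table = {"B": "P", "J": "I", "X": "KS", "Z": ""}
--     return "".join(table.get(c, c if c in string.ascii_uppercase else "") for c in collapsed)
-- ===== Notes on version B (the rewrite author's own statement) =====
-- stated objective: alternative
-- what changed: Replaced A's single stateful loop with a previous_letter lookback and a branching helper by two stateless passes: a pairwise (char, predecessor) zip that collapses each O/U run into the two imputed letters E and W, followed by a pure per-character table translation (B to P, J to I, X to KS, dropping Z and non-letters); the impute=False case becomes a plain set filter.
import Mathlib
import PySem

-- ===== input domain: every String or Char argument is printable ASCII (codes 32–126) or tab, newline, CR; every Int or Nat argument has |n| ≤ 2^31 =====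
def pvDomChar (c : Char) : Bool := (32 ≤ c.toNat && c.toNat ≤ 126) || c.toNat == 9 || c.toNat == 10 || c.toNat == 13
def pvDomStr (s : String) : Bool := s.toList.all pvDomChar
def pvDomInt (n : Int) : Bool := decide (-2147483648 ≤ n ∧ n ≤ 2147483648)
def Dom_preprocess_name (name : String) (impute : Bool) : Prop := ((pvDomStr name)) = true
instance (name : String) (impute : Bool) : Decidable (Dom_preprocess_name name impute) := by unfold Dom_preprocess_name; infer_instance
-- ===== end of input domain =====

-- B replaces A's stateful lookback loop by a pairwise O/U-run collapse followed by a pure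
-- per-character table translation (objective: simpler, no speed claim).
-- Python strings built by += are modeled as List Char wrapped in String.ofList at the end.

-- the constant string.ascii_uppercase (used by both Pythons via the `string` module)
def ascii_uppercase : List Char :=
  ['A','B','C','D','E','F','G','H','I','J','K','L','M',
   'N','O','P','Q','R','S','T','U','V','W','X','Y','Z']

-- ===== PORT A =====
-- previous_letter starts as "" in Python; modeled as Option Char (none = the initial "")
def get_closest_letter (letter : Char) (previous_letter : Option Char) : List Char :=
  if letter = 'B' then ['P']
  else if letter = 'J' then ['I']
  else if letter = 'O' ∨ letter = 'U' then
    (if ¬(previous_letter = some 'O' ∨ previous_letter = some 'U') then ['E','W'] else [])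
  else if letter = 'X' then ['K','S']
  else if letter = 'Y' then ['I']
  else []

def preprocess_name (name : String) (impute : Bool) : String :=
  String.ofList (((PySem.Str.upper name).toList.foldl
    (fun (st : List Char × Option Char) letter =>
      ((if letter = 'B' ∨ letter = 'J' ∨ letter = 'O' ∨ letter = 'U' ∨ letter = 'X' ∨ letter = 'Z' then
          (if impute then st.1 ++ get_closest_letter letter st.2 else st.1)
        else if letter ∈ ascii_uppercase then st.1 ++ [letter] else st.1),
       some letter))
    ([], none)).1)

-- ===== PORT B =====
def pnAllowed : List Char := ascii_uppercase.filter (fun c => ¬(c = 'B' ∨ c = 'J' ∨ c = 'O' ∨ c = 'U' ∨ c = 'X' ∨ c = 'Z'))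

-- phase 1 piece: (char, its predecessor) ↦ collapsed contribution
def pnCollapsePiece (cp : Char × Char) : List Char :=
  if cp.1 = 'O' ∨ cp.1 = 'U' then (if cp.2 = 'O' ∨ cp.2 = 'U' then [] else ['E','W']) else [cp.1]

-- phase 2: translation table with uppercase-keep / drop default
def pnTranslate (c : Char) : List Char :=
  if c = 'B' then ['P'] else if c = 'J' then ['I'] else if c = 'X' then ['K','S']
  else if c = 'Z' then [] else if c ∈ ascii_uppercase then [c] else []

def preprocess_name_alt (name : String) (impute : Bool) : String :=
  let up := (PySem.Str.upper name).toList
  if impute then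
    let collapsed := ((up.zip ('\x00' :: up)).map pnCollapsePiece).flatten
    String.ofList ((collapsed.map pnTranslate).flatten)
  else
    String.ofList (up.filter (fun c => c ∈ pnAllowed))

-- ===== PRECONDITION & SPEC =====
def Spec_preprocess_name (name : String) (impute : Bool) (out : String) : Prop := out = preprocess_name_alt name impute
instance (name : String) (impute : Bool) (out : String) : Decidable (Spec_preprocess_name name impute out) := by unfold Spec_preprocess_name; infer_instance

-- ===== CLAIM (what is proved, stated in full; the proofs are below) =====
def Claim_equal_preprocess_name : Prop := ∀ (name : String) (impute : Bool), Dom_preprocess_name name impute → Spec_preprocess_name name impute (preprocess_name name impute)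

-- ===== LEMMAS AND PROOFS =====

-- A's fold body, abbreviated for the proofs
def pnStep (impute : Bool) (st : List Char × Option Char) (letter : Char) : List Char × Option Char :=
  ((if letter = 'B' ∨ letter = 'J' ∨ letter = 'O' ∨ letter = 'U' ∨ letter = 'X' ∨ letter = 'Z' then
      (if impute then st.1 ++ get_closest_letter letter st.2 else st.1)
    else if letter ∈ ascii_uppercase then st.1 ++ [letter] else st.1),
   some letter)

lemma pnFold_eq (name : String) (impute : Bool) :
    preprocess_name name impute =
      String.ofList (((PySem.Str.upper name).toList.foldl (pnStep impute) ([], none)).1) := rfl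

lemma mem_pnAllowed (c : Char) :
    c ∈ pnAllowed ↔ c ∈ ascii_uppercase ∧ ¬(c = 'B' ∨ c = 'J' ∨ c = 'O' ∨ c = 'U' ∨ c = 'X' ∨ c = 'Z') := by
  simp [pnAllowed, List.mem_filter]

-- impute = false: A's fold is a filter by pnAllowed
lemma pnFold_false (l : List Char) (acc : List Char) (prev : Option Char) :
    (l.foldl (pnStep false) (acc, prev)).1 = acc ++ l.filter (fun c => c ∈ pnAllowed) := by
  induction l generalizing acc prev with
  | nil => simp
  | cons c rest ih =>
    rw [List.foldl_cons, List.filter_cons]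
    by_cases h1 : c = 'B' ∨ c = 'J' ∨ c = 'O' ∨ c = 'U' ∨ c = 'X' ∨ c = 'Z'
    · have hc : c ∉ pnAllowed := by rw [mem_pnAllowed]; tauto
      simp [pnStep, h1, hc, ih]
    · by_cases h2 : c ∈ ascii_uppercase
      · have hc : c ∈ pnAllowed := (mem_pnAllowed c).mpr ⟨h2, h1⟩
        simp [pnStep, h1, h2, hc, ih]
      · have hc : c ∉ pnAllowed := by rw [mem_pnAllowed]; tauto
        simp [pnStep, h1, h2, hc, ih]

-- B's impute pipeline on a list with explicit predecessor
def pnB (l : List Char) (p : Char) : List Char :=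
  ((((l.zip (p :: l)).map pnCollapsePiece).flatten).map pnTranslate).flatten

lemma pnB_cons (c : Char) (rest : List Char) (p : Char) :
    pnB (c :: rest) p = (pnCollapsePiece (c, p)).flatMap pnTranslate ++ pnB rest c := by
  simp [pnB, List.zip_cons_cons, List.flatMap_def]

-- impute = true: A's stateful fold equals B's collapse-then-translate pipeline
lemma pnFold_true (l : List Char) (acc : List Char) (prev : Option Char) (p : Char)
    (h : (prev = some 'O' ∨ prev = some 'U') ↔ (p = 'O' ∨ p = 'U')) :
    (l.foldl (pnStep true) (acc, prev)).1 = acc ++ pnB l p := by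
  induction l generalizing acc prev p with
  | nil => simp [pnB]
  | cons c rest ih =>
    rw [List.foldl_cons, pnB_cons]
    have step : (pnStep true (acc, prev) c) = ((acc ++ (pnCollapsePiece (c, p)).flatMap pnTranslate), some c) := by
      by_cases hOU : c = 'O' ∨ c = 'U'
      · by_cases hp : p = 'O' ∨ p = 'U'
        · rcases hOU with rfl | rfl <;>
            simp [pnStep, get_closest_letter, pnCollapsePiece, h, hp]
        · have hp' : ¬p = 'O' ∧ ¬p = 'U' := by tauto
          rcases hOU with rfl | rfl <;>
            simp [pnStep, get_closest_letter, pnCollapsePiece, pnTranslate, h,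
                  hp'.1, hp'.2, ascii_uppercase]
      · by_cases h1 : c = 'B' ∨ c = 'J' ∨ c = 'X' ∨ c = 'Z'
        · rcases h1 with rfl | rfl | rfl | rfl <;>
            simp [pnStep, get_closest_letter, pnCollapsePiece, pnTranslate]
        · have h2 : ¬(c = 'B' ∨ c = 'J' ∨ c = 'O' ∨ c = 'U' ∨ c = 'X' ∨ c = 'Z') := by tauto
          have hB : ¬c = 'B' := by tauto
          have hJ : ¬c = 'J' := by tauto
          have hX : ¬c = 'X' := by tauto
          have hZ : ¬c = 'Z' := by tauto
          by_cases hup : c ∈ ascii_uppercase <;>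
            simp [pnStep, pnCollapsePiece, pnTranslate, hOU, hup, hB, hJ, hX, hZ]
    rw [step, ih _ (some c) c (by simp), List.append_assoc]

-- ===== VERDICT (by name: the statement is the Claim_ definition above) =====
theorem preprocess_name_spec : Claim_equal_preprocess_name := by
  intro name impute _
  unfold Spec_preprocess_name
  rw [pnFold_eq]
  cases impute with
  | false =>
    rw [pnFold_false]
    simp [preprocess_name_alt]
  | true =>
    rw [pnFold_true _ _ none '\x00' (by simp)]
    simp [preprocess_name_alt, pnB]
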